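-- pv_equiv track=rewrite | github.com/ReddishXia/LDA_TF-IDF_Trigram_VIsion | sonWork.py | return_MinMainString
-- ===== SOURCE A (Python) =====
-- def return_MinMainString(text,str,pattern_First_Positions):
--     for i in range(len(text)):
--         if text[i] == str[0]:
--             pattern_First_Positions.append(i)
--     pattern_First_Positions=pattern_First_Positions[::-1]
--
--     for num,position in  enumerate(pattern_First_Positions):
--         match_Len=0
--         i=0
--         for x in range(position, len(text)):
--             if text[x]==str[i]:
--                 match_Len+=1
--                 i += 1
--         if match_Len==len(str):
--             return num
--     return -1
-- ===== SOURCE B (Python) =====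
-- # B: one reverse greedy pass finds the latest start at which str is a subsequence of a
-- # suffix of text, then the answer is the number of first-char occurrences after that start.
-- # Like A, it extends pattern_First_Positions in place with the first-char occurrence indices.
--
-- def return_MinMainString(text, str, pattern_First_Positions):
--     if not str:
--         return 0
--     occ = [i for i in range(len(text)) if text[i] == str[0]]
--     pattern_First_Positions += occ
--     j = len(str) - 1
--     for x in range(len(text) - 1, -1, -1):
--         if text[x] == str[j]:
--             j -= 1
--             if j < 0:
--                 return sum(1 for p in occ if p > x)
--     return -1
-- ===== Notes on version B (the rewrite author's own statement) =====
-- stated objective: faster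
-- what changed: Instead of re-scanning the whole tail of text for every first-char occurrence (newest first), B makes one reverse greedy pass over text to find the latest start at which str fits a suffix as a subsequence and returns the count of first-char occurrences after it; Pre_ excludes the inputs on which A raises IndexError (str[i] read past the end once a match completes early, str[0] on an empty pattern, text[x] below -len(text)) plus the empty-pattern empty-text corner where A's -1/0 comes from an accidentally empty candidate list.
-- intended difference: On inputs where str fits no suffix of text but a seeded negative position p makes A's range(p, len(text)) loop wrap around and scan text[p:]+text, where str does fit, A returns that candidate's rank while B returns -1; the wraparound read is accidental negative indexing, so -1 (no suffix match) is the intended value. — e.g. on return_MinMainString("ab", "bab", [-1]): A returns 1, B returns -1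
-- outside the precondition, e.g. on return_MinMainString('', '', []): A returns -1, B returns 0; on return_MinMainString('ab', 'a', []): A raises IndexError, B returns 0
import Mathlib
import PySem

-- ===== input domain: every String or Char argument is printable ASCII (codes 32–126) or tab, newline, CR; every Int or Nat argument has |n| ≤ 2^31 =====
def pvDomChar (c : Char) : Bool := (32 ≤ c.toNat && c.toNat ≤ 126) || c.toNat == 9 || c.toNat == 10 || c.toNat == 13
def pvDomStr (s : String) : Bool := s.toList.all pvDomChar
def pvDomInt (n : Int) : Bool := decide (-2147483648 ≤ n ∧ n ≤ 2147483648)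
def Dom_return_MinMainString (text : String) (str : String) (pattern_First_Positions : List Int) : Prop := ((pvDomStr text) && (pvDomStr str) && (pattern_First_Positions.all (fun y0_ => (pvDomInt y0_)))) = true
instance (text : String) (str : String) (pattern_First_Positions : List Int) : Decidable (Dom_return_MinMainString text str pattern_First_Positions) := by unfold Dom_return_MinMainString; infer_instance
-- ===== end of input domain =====

-- B replaces A's per-candidate O(n) rescans by one reverse greedy pass that finds the
-- latest start at which str fits a suffix of text, then counts first-char occurrences
-- after it (objective: faster). Like A, B also extends pattern_First_Positions in place
-- on the Python side; the equivalence proved here is about the returned rank.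

-- ===== PORT A =====
-- inner loop 'for x in range(position, len(text))': state (match_Len, i); a lookup that
-- Python would raise on (text[x] / str[i] out of range) yields none and leaves the state
-- unchanged here — Pre_ excludes exactly the inputs where Python reaches such a lookup.
def pvScanA (t pat : List Char) (p : Int) : Nat × Nat :=
  (PySem.List.pyRange p (t.length : Int)).foldl
    (fun s x =>
      match PySem.List.pyGet? t x, PySem.List.pyGet? pat (Int.ofNat s.2) with
      | some a, some b => if a = b then (s.1 + 1, s.2 + 1) else s
      | _, _ => s) (0, 0)

-- 'for num, position in enumerate(...)' with early return: num is the counter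
def pvGoA (t pat : List Char) : Nat → List Int → Int
  | _, [] => -1
  | num, p :: rest =>
      if (pvScanA t pat p).1 = pat.length then Int.ofNat num else pvGoA t pat (num + 1) rest

def return_MinMainString (text : String) (str : String) (pattern_First_Positions : List Int) : Int :=
  let t := text.toList
  let pat := str.toList
  let pfp := (PySem.List.pyRange 0 (t.length : Int)).foldl
      (fun acc i => if PySem.List.pyGet? t i = PySem.List.pyGet? pat 0 then acc ++ [i] else acc)
      pattern_First_Positions
  pvGoA t pat 0 pfp.reverse

-- ===== PORT B =====
-- 'for x in range(len(text)-1, -1, -1)' with state j and the early return: the loop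
-- returns (final j, matched start x); a completed match is j < 0
def pvRevLoopB (t pat : List Char) : Nat → Int → Int × Int
  | 0, j => (j, -1)
  | x + 1, j =>
      if PySem.List.pyGet? t (Int.ofNat x) = PySem.List.pyGet? pat j then
        if j - 1 < 0 then (j - 1, Int.ofNat x) else pvRevLoopB t pat x (j - 1)
      else pvRevLoopB t pat x j

def return_MinMainString_alt (text : String) (str : String) (pattern_First_Positions : List Int) : Int :=
  let t := text.toList
  let pat := str.toList
  if pat = [] then 0
  else
    let occ := (List.range t.length).filter
        (fun (i : Nat) => decide (PySem.List.pyGet? t (i : Int) = PySem.List.pyGet? pat 0))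
    let r := pvRevLoopB t pat t.length ((pat.length : Int) - 1)
    if r.1 < 0 then ((occ.filter (fun (i : Nat) => decide (r.2 < (i : Int)))).length : Int)
    else -1

-- ===== PRECONDITION & SPEC =====
-- Pre_'s and D_'s own copies of the scanned-character sequence and candidate list
-- (they may not reference the ports' definitions).
def pvScannedP (t : List Char) (p : Int) : List Char :=
  if 0 ≤ p then t.drop p.toNat else t.drop (t.length + p).toNat ++ t

def pvCandsP (t pat : List Char) (init : List Int) : List Int :=
  (init ++ ((List.range t.length).filter (fun i => decide (t[i]? = pat[0]?))).map
    (fun i => (i : Int))).reverse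

-- Pre_ excludes exactly the inputs on which A raises IndexError, plus one corner where it
-- returns: (a) for nonempty str, the scan raises unless, at the first candidate start that is
-- below -len(text) or at which str fits as a subsequence of the scanned characters, the start
-- is in range and the fit needs the very last scanned character; (b) for empty str, A raises
-- on str[0] whenever text is nonempty (and on a negative first seeded position when text is
-- empty); the one excluded returning corner is empty str with empty text and no seeded
-- position, where A's -1 is an accident of its empty candidate list (see cites).
def Pre_return_MinMainString (text : String) (str : String) (pattern_First_Positions : List Int) : Prop :=
  (str.toList ≠ [] ∧
    (Option.all
      (fun p => decide (-(text.toList.length : Int) ≤ p) &&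
        !(decide (List.Sublist str.toList (pvScannedP text.toList p).dropLast)))
      ((pvCandsP text.toList str.toList pattern_First_Positions).find?
        (fun p => decide (p < -(text.toList.length : Int)) ||
          decide (List.Sublist str.toList (pvScannedP text.toList p))))) = true) ∨
  (str.toList = [] ∧ text.toList = [] ∧
    (pattern_First_Positions.reverse.head?.elim false (fun p => decide (0 ≤ p))) = true)

instance (text : String) (str : String) (pattern_First_Positions : List Int) : Decidable (Pre_return_MinMainString text str pattern_First_Positions) := by
  unfold Pre_return_MinMainString; infer_instance

def pvWitness_return_MinMainString : String × String × List Int := ("ab", "b", [])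

-- On inputs where str fits no suffix of text but some seeded negative position p makes A's
-- range(p, len(text)) loop wrap around and scan text[p:]+text, where str does fit, A returns
-- that candidate's rank while B returns -1; the wraparound read is accidental negative
-- indexing, so -1 (no suffix match) is the intended value.
def D_return_MinMainString (text : String) (str : String) (pattern_First_Positions : List Int) : Prop :=
  str.toList ≠ [] ∧ ¬ List.Sublist str.toList text.toList ∧
  ∃ p ∈ pattern_First_Positions, p < 0 ∧ List.Sublist str.toList (pvScannedP text.toList p)

instance (text : String) (str : String) (pattern_First_Positions : List Int) : Decidable (D_return_MinMainString text str pattern_First_Positions) := by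
  unfold D_return_MinMainString; infer_instance

def Spec_return_MinMainString (text : String) (str : String) (pattern_First_Positions : List Int) (out : Int) : Prop := ¬ D_return_MinMainString text str pattern_First_Positions → out = return_MinMainString_alt text str pattern_First_Positions
instance (text : String) (str : String) (pattern_First_Positions : List Int) (out : Int) : Decidable (Spec_return_MinMainString text str pattern_First_Positions out) := by unfold Spec_return_MinMainString; infer_instance

def pvDiffWitness_return_MinMainString : String × String × List Int := ("ab", "bab", [-1])
def pvDiffWitnessOut_return_MinMainString : Int × Int := (1, -1)

-- ===== CLAIM =====
def Claim_unchanged_return_MinMainString : Prop := ∀ (text : String) (str : String) (pattern_First_Positions : List Int), Dom_return_MinMainString text str pattern_First_Positions → Pre_return_MinMainString text str pattern_First_Positions → Spec_return_MinMainString text str pattern_First_Positions (return_MinMainString text str pattern_First_Positions)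
def Claim_changed_return_MinMainString : Prop := Dom_return_MinMainString (pvDiffWitness_return_MinMainString.1) (pvDiffWitness_return_MinMainString.2.1) (pvDiffWitness_return_MinMainString.2.2) ∧ Pre_return_MinMainString (pvDiffWitness_return_MinMainString.1) (pvDiffWitness_return_MinMainString.2.1) (pvDiffWitness_return_MinMainString.2.2) ∧ D_return_MinMainString (pvDiffWitness_return_MinMainString.1) (pvDiffWitness_return_MinMainString.2.1) (pvDiffWitness_return_MinMainString.2.2) ∧ return_MinMainString (pvDiffWitness_return_MinMainString.1) (pvDiffWitness_return_MinMainString.2.1) (pvDiffWitness_return_MinMainString.2.2) = pvDiffWitnessOut_return_MinMainString.1 ∧ return_MinMainString_alt (pvDiffWitness_return_MinMainString.1) (pvDiffWitness_return_MinMainString.2.1) (pvDiffWitness_return_MinMainString.2.2) = pvDiffWitnessOut_return_MinMainString.2 ∧ pvDiffWitnessOut_return_MinMainString.1 ≠ pvDiffWitnessOut_return_MinMainString.2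
def Claim_exact_return_MinMainString : Prop := ∀ (text : String) (str : String) (pattern_First_Positions : List Int), Dom_return_MinMainString text str pattern_First_Positions → Pre_return_MinMainString text str pattern_First_Positions → D_return_MinMainString text str pattern_First_Positions → return_MinMainString text str pattern_First_Positions ≠ return_MinMainString_alt text str pattern_First_Positions

-- ===== LEMMAS AND PROOFS =====

-- greedy match count of pat inside s
def pvGcount : List Char → List Char → Nat
  | [], _ => 0
  | _ :: _, [] => 0
  | b :: bs, a :: s => if a = b then pvGcount bs s + 1 else pvGcount (b :: bs) s

-- folding a lookup-guarded body equals folding the successfully read characters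
lemma pvFoldFilterMap (m : Int → Option Char) (g : Nat × Nat → Char → Nat × Nat) :
    ∀ (l : List Int) (s : Nat × Nat),
      l.foldl (fun s x => match m x with | some a => g s a | none => s) s
        = (l.filterMap m).foldl g s := by
  intro l
  induction l with
  | nil => intro s; rfl
  | cons x xs ih =>
      intro s
      cases h : m x <;> simp [h, ih]

-- the characters the inner loop of A actually reads are pvScannedP t p
lemma pvReadNonneg (t : List Char) : ∀ (k : Nat),
    (PySem.List.pyRange (k : Int) (t.length : Int)).filterMap (PySem.List.pyGet? t)
      = t.drop k := by
  suffices H : ∀ (d k : Nat), t.length - k = d →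
      (PySem.List.pyRange (k : Int) (t.length : Int)).filterMap (PySem.List.pyGet? t)
        = t.drop k by
    intro k; exact H (t.length - k) k rfl
  intro d
  induction d with
  | zero =>
      intro k hk
      rw [PySem.List.pyRange_one_eq_nil (by omega), List.filterMap_nil,
        List.drop_eq_nil_of_le (by omega)]
  | succ d ih =>
      intro k hk
      have hklt : k < t.length := by omega
      rw [PySem.List.pyRange_one_cons (by exact_mod_cast hklt), List.filterMap_cons]
      have h1 : ((k : Int) + 1) = ((k + 1 : Nat) : Int) := by push_cast; ring
      rw [h1, PySem.List.pyGet?_natCast, List.getElem?_eq_getElem hklt,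
        ih (k + 1) (by omega), List.drop_eq_getElem_cons hklt]

lemma pvReadNeg (t : List Char) : ∀ (d : Nat) (p : Int), p < 0 → (-p).toNat = d →
    (PySem.List.pyRange p 0).filterMap (PySem.List.pyGet? t)
      = t.drop ((t.length : Int) + p).toNat := by
  intro d
  induction d with
  | zero => intro p hp hd; omega
  | succ d ih =>
      intro p hp hd
      rw [PySem.List.pyRange_one_cons hp, List.filterMap_cons]
      by_cases hlow : p < -(t.length : Int)
      · have hnone : PySem.List.pyGet? t p = none := by
          rw [PySem.List.pyGet?_eq_none_iff]
          unfold PySem.Raise.InRange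
          omega
        rw [hnone]
        by_cases hp1 : p + 1 < 0
        · rw [ih (p + 1) hp1 (by omega)]
          have he : ((t.length : Int) + (p + 1)).toNat = ((t.length : Int) + p).toNat := by
            omega
          rw [he]
        · have hp1' : p = -1 := by omega
          have hlen : t.length = 0 := by omega
          have ht : t = [] := List.eq_nil_of_length_eq_zero hlen
          subst ht
          subst hp1'
          simp [PySem.List.pyRange_one_eq_nil]
      · obtain ⟨k, hk0, hklen, hpk⟩ : ∃ k : Nat, 0 < k ∧ k ≤ t.length ∧ p = -(k : Int) :=
          ⟨(-p).toNat, by omega, by omega, by omega⟩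
        subst hpk
        have hidx : t.length - k < t.length := by omega
        rw [PySem.List.pyGet?_neg_natCast t k hk0 hklen, List.getElem?_eq_getElem hidx]
        by_cases hp1 : -(k : Int) + 1 < 0
        · rw [ih (-(k : Int) + 1) hp1 (by omega)]
          have h2 : ((t.length : Int) + -(k : Int)).toNat = t.length - k := by omega
          have h3 : ((t.length : Int) + (-(k : Int) + 1)).toNat = t.length - k + 1 := by omega
          rw [h2, h3, List.drop_eq_getElem_cons hidx]
        · have hk1 : k = 1 := by omega
          subst hk1
          rw [PySem.List.pyRange_one_eq_nil (by omega)]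
          simp only [List.filterMap_nil]
          have h2 : ((t.length : Int) + -((1 : Nat) : Int)).toNat = t.length - 1 := by omega
          rw [h2, List.drop_eq_getElem_cons hidx, List.drop_eq_nil_of_le (by omega)]

lemma pvReadChars (t : List Char) (p : Int) :
    (PySem.List.pyRange p (t.length : Int)).filterMap (PySem.List.pyGet? t)
      = pvScannedP t p := by
  unfold pvScannedP
  by_cases hp : 0 ≤ p
  · rw [if_pos hp]
    have hpeq : p = ((p.toNat : Nat) : Int) := by omega
    rw [hpeq]
    exact pvReadNonneg t p.toNat
  · rw [if_neg hp]
    rw [PySem.List.pyRange_one_append p 0 (t.length : Int) (by omega) (by omega),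
      List.filterMap_append]
    rw [pvReadNeg t (-p).toNat p (by omega) rfl]
    have h0 : ((0 : Nat) : Int) = (0 : Int) := rfl
    rw [← h0, pvReadNonneg t 0, List.drop_zero]

lemma pvGcount_nil (pat : List Char) : pvGcount pat [] = 0 := by
  cases pat <;> rfl

lemma pvGcount_cons_pos {c d : Char} (cs ds : List Char) (h : d = c) :
    pvGcount (c :: cs) (d :: ds) = pvGcount cs ds + 1 := by
  simp [pvGcount, h]

lemma pvGcount_cons_neg {c d : Char} (cs ds : List Char) (h : ¬ d = c) :
    pvGcount (c :: cs) (d :: ds) = pvGcount (c :: cs) ds := by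
  simp [pvGcount, h]

lemma pvFoldGcount (pat : List Char) : ∀ (s : List Char) (i m : Nat),
    s.foldl (fun s a => match pat[s.2]? with
      | some b => if a = b then (s.1 + 1, s.2 + 1) else s
      | none => s) (m, i)
      = (m + pvGcount (List.drop i pat) s, i + pvGcount (List.drop i pat) s) := by
  intro s
  induction s with
  | nil => intro i m; simp [pvGcount_nil]
  | cons a s ih =>
      intro i m
      rw [List.foldl_cons]
      cases h : pat[i]? with
      | none =>
          have hd : List.drop i pat = [] := List.drop_eq_nil_of_le (by
            exact List.getElem?_eq_none_iff.mp h)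
          simp only [h]
          rw [ih i m, hd]
          simp [pvGcount]
      | some b =>
          have hlt : i < pat.length := by
            by_contra hc
            rw [List.getElem?_eq_none (by omega)] at h
            simp at h
          have hb : pat[i] = b := by
            rw [List.getElem?_eq_getElem hlt] at h
            injection h
          have hd : List.drop i pat = pat[i] :: List.drop (i + 1) pat :=
            List.drop_eq_getElem_cons hlt
          rw [hd, hb]
          by_cases hab : a = b
          · subst hab
            simp only [if_true]
            rw [ih (i + 1) (m + 1), pvGcount_cons_pos _ _ rfl]
            simp only [Prod.mk.injEq]
            omega
          · simp only [h]
            rw [if_neg hab, ih i m, hd, hb, pvGcount_cons_neg _ _ hab]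

lemma pvScanA_eq (t pat : List Char) (p : Int) :
    (pvScanA t pat p).1 = pvGcount pat (pvScannedP t p) := by
  unfold pvScanA
  have hfun : (fun (s : Nat × Nat) (x : Int) =>
      match PySem.List.pyGet? t x, PySem.List.pyGet? pat (Int.ofNat s.2) with
      | some a, some b => if a = b then (s.1 + 1, s.2 + 1) else s
      | _, _ => s)
      = (fun (s : Nat × Nat) (x : Int) =>
        match PySem.List.pyGet? t x with
        | some a => (match pat[s.2]? with
            | some b => if a = b then (s.1 + 1, s.2 + 1) else s
            | none => s)
        | none => s) := by
    funext s x
    rw [show Int.ofNat s.2 = ((s.2 : Nat) : Int) from rfl, PySem.List.pyGet?_natCast]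
    cases PySem.List.pyGet? t x <;> cases pat[s.2]? <;> rfl
  rw [hfun, pvFoldFilterMap, pvReadChars, pvFoldGcount]
  simp

-- subsequence test used only in the proofs, to relate pvGcount to List.Sublist
def pvIsSubseq : List Char → List Char → Bool
  | [], _ => true
  | _ :: _, [] => false
  | c :: cs, d :: ds => if c = d then pvIsSubseq cs ds else pvIsSubseq (c :: cs) ds

lemma pvIsSubseq_cons_pos {c d : Char} (cs ds : List Char) (h : c = d) :
    pvIsSubseq (c :: cs) (d :: ds) = pvIsSubseq cs ds := by
  simp [pvIsSubseq, h]

lemma pvIsSubseq_cons_neg {c d : Char} (cs ds : List Char) (h : ¬ c = d) :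
    pvIsSubseq (c :: cs) (d :: ds) = pvIsSubseq (c :: cs) ds := by
  simp [pvIsSubseq, h]

lemma pvConsNe {c d : Char} {cs ds : List Char} (h : c ≠ d) :
    List.Sublist (c :: cs) (d :: ds) ↔ List.Sublist (c :: cs) ds := by
  rw [List.sublist_cons_iff]
  constructor
  · rintro (h1 | ⟨r, hr, _⟩)
    · exact h1
    · injection hr with h1 _
      exact absurd h1 h
  · exact Or.inl

lemma pvIsSubseq_iff_gcount (pat s : List Char) :
    pvIsSubseq pat s = true ↔ pvGcount pat s = pat.length := by
  induction s generalizing pat with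
  | nil => cases pat <;> simp [pvIsSubseq, pvGcount_nil]
  | cons a s ih =>
      cases pat with
      | nil => simp [pvIsSubseq, pvGcount]
      | cons b bs =>
          by_cases hab : b = a
          · subst hab
            rw [pvIsSubseq_cons_pos _ _ rfl, pvGcount_cons_pos _ _ rfl, ih bs]
            simp only [List.length_cons]
            omega
          · rw [pvIsSubseq_cons_neg _ _ hab,
              pvGcount_cons_neg _ _ (fun hh => hab hh.symm), ih (b :: bs)]

lemma pvSnocSnoc {u v : List Char} {a : Char} :
    List.Sublist (u ++ [a]) (v ++ [a]) ↔ List.Sublist u v := by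
  rw [← List.reverse_sublist]; simp [List.cons_sublist_cons, List.reverse_sublist]

lemma pvSnocNe {u v : List Char} {a b : Char} (h : a ≠ b) :
    List.Sublist (u ++ [a]) (v ++ [b]) ↔ List.Sublist (u ++ [a]) v := by
  constructor
  · intro hs
    rw [← List.reverse_sublist] at hs ⊢
    rw [List.reverse_append, List.reverse_append] at hs
    simp only [List.reverse_singleton, List.singleton_append] at hs
    rw [List.reverse_append]
    simp only [List.reverse_singleton, List.singleton_append]
    exact (pvConsNe h).mp hs
  · intro hs
    exact hs.trans (List.sublist_append_left v [b])

lemma pvIsSubseq_iff_sublist (pat s : List Char) :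
    pvIsSubseq pat s = true ↔ List.Sublist pat s := by
  induction s generalizing pat with
  | nil =>
      cases pat with
      | nil => simp [pvIsSubseq]
      | cons b bs => simp [pvIsSubseq]
  | cons a s ih =>
      cases pat with
      | nil => simp [pvIsSubseq, List.nil_sublist]
      | cons b bs =>
          by_cases hab : b = a
          · subst hab
            rw [pvIsSubseq_cons_pos _ _ rfl, ih bs, List.cons_sublist_cons]
          · rw [pvIsSubseq_cons_neg _ _ hab, ih (b :: bs), pvConsNe hab]

lemma pvCondA_iff (t pat : List Char) (p : Int) :
    (pvScanA t pat p).1 = pat.length ↔ List.Sublist pat (pvScannedP t p) := by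
  rw [pvScanA_eq, ← pvIsSubseq_iff_gcount, pvIsSubseq_iff_sublist]

lemma pvTakeNE (pat : List Char) (j : Nat) (hj : j < pat.length) : pat.take (j + 1) ≠ [] := by
  intro h
  rcases List.take_eq_nil_iff.mp h with h1 | h1
  · omega
  · subst h1; simp at hj

-- the reverse greedy loop of B: if a prefix of pat fits the scanned prefix of text as a
-- subsequence it reports j < 0 together with the LATEST start of a fit, otherwise j stays ≥ 0
lemma pvRevLoopB_spec (t pat : List Char) :
    ∀ (x j : Nat), x ≤ t.length → j < pat.length →
      (if List.Sublist (pat.take (j + 1)) (t.take x) then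
        ∃ p : Nat, pvRevLoopB t pat x (Int.ofNat j) = (-1, Int.ofNat p) ∧ p < x ∧
          List.Sublist (pat.take (j + 1)) ((t.take x).drop p) ∧
          ∀ q : Nat, p < q → ¬ List.Sublist (pat.take (j + 1)) ((t.take x).drop q)
      else 0 ≤ (pvRevLoopB t pat x (Int.ofNat j)).1) := by
  intro x
  induction x with
  | zero =>
      intro j hx hj
      rw [if_neg]
      · simp [pvRevLoopB]
      · intro hcontra
        rw [List.take_zero] at hcontra
        exact pvTakeNE pat j hj (List.sublist_nil.mp hcontra)
  | succ x ih =>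
      intro j hx hj
      have hxlen : x < t.length := by omega
      have hpt : PySem.List.pyGet? t (Int.ofNat x) = some t[x] := by
        rw [show Int.ofNat x = ((x : Nat) : Int) from rfl, PySem.List.pyGet?_natCast,
          List.getElem?_eq_getElem hxlen]
      have hpp : PySem.List.pyGet? pat (Int.ofNat j) = some pat[j] := by
        rw [show Int.ofNat j = ((j : Nat) : Int) from rfl, PySem.List.pyGet?_natCast,
          List.getElem?_eq_getElem hj]
      have htt : t.take (x + 1) = t.take x ++ [t[x]] := by
        rw [List.take_succ, List.getElem?_eq_getElem hxlen]
        rfl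
      have hpt2 : pat.take (j + 1) = pat.take j ++ [pat[j]] := by
        rw [List.take_succ, List.getElem?_eq_getElem hj]
        rfl
      have hdp : ∀ q : Nat, q ≤ x → (t.take (x + 1)).drop q = (t.take x).drop q ++ [t[x]] := by
        intro q hqx
        rw [htt, List.drop_append_of_le_length (by rw [List.length_take]; omega)]
      simp only [pvRevLoopB]
      by_cases hc : t[x] = pat[j]
      · have hcnd : PySem.List.pyGet? t (Int.ofNat x) = PySem.List.pyGet? pat (Int.ofNat j) := by
          rw [hpt, hpp, hc]
        cases j with
        | zero =>
            have hM0 : List.Sublist (pat.take (0 + 1)) (t.take (x + 1)) := by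
              rw [hpt2, htt]
              simp only [List.take_zero, List.nil_append]
              rw [← hc]
              exact List.sublist_append_right _ _
            rw [if_pos hM0]
            refine ⟨x, ?_, by omega, ?_, ?_⟩
            · rw [if_pos hcnd, if_pos (show (Int.ofNat 0 - 1 : Int) < 0 from by decide),
                show (Int.ofNat 0 - 1 : Int) = -1 from by decide]
            · have hdx : (t.take (x + 1)).drop x = [t[x]] := by
                rw [hdp x (le_refl x), List.drop_eq_nil_of_le (by rw [List.length_take]; omega),
                  List.nil_append]
              rw [hdx, hpt2]
              simp only [List.take_zero, List.nil_append]
              rw [hc]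
            · intro q hq hcontra
              rw [List.drop_eq_nil_of_le (by rw [List.length_take]; omega)] at hcontra
              exact pvTakeNE pat 0 hj (List.sublist_nil.mp hcontra)
        | succ j' =>
            have hcast : (Int.ofNat (j' + 1) - 1 : Int) = Int.ofNat j' := by
              rw [show Int.ofNat (j' + 1) = ((j' + 1 : Nat) : Int) from rfl,
                show Int.ofNat j' = ((j' : Nat) : Int) from rfl]
              push_cast
              ring
            rw [hcast, if_neg (not_lt.mpr (Int.natCast_nonneg j') : ¬ (Int.ofNat j' : Int) < 0)]
            have hE : List.Sublist (pat.take (j' + 1 + 1)) (t.take (x + 1)) ↔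
                List.Sublist (pat.take (j' + 1)) (t.take x) := by
              rw [hpt2, htt, hc]
              exact pvSnocSnoc
            have IH := ih j' (by omega) (by omega)
            by_cases hM : List.Sublist (pat.take (j' + 1)) (t.take x)
            · rw [if_pos (hE.mpr hM)]
              rw [if_pos hM] at IH
              obtain ⟨p, hrec, hplt, hsub, hmax⟩ := IH
              refine ⟨p, ?_, by omega, ?_, ?_⟩
              · rw [if_pos hcnd]
                exact hrec
              · rw [hdp p (by omega), hpt2, hc]
                exact List.Sublist.append hsub (List.Sublist.refl _)
              · intro q hq hcontra
                by_cases hqx : q ≤ x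
                · rw [hdp q hqx, hpt2, hc] at hcontra
                  exact hmax q hq (pvSnocSnoc.mp hcontra)
                · rw [List.drop_eq_nil_of_le (by rw [List.length_take]; omega)] at hcontra
                  exact pvTakeNE pat (j' + 1) hj (List.sublist_nil.mp hcontra)
            · rw [if_neg (fun h => hM (hE.mp h)), if_pos hcnd]
              rw [if_neg hM] at IH
              exact IH
      · have hcndn : ¬ (PySem.List.pyGet? t (Int.ofNat x) = PySem.List.pyGet? pat (Int.ofNat j)) := by
          intro h2
          rw [hpt, hpp] at h2
          injection h2 with h2
          exact hc h2
        have hE : List.Sublist (pat.take (j + 1)) (t.take (x + 1)) ↔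
            List.Sublist (pat.take (j + 1)) (t.take x) := by
          rw [hpt2, htt]
          exact pvSnocNe (fun he => hc he.symm)
        have IH := ih j (by omega) hj
        by_cases hM : List.Sublist (pat.take (j + 1)) (t.take x)
        · rw [if_pos (hE.mpr hM)]
          rw [if_pos hM] at IH
          obtain ⟨p, hrec, hplt, hsub, hmax⟩ := IH
          refine ⟨p, ?_, by omega, ?_, ?_⟩
          · rw [if_neg hcndn]
            exact hrec
          · rw [hdp p (by omega)]
            exact hsub.trans (List.sublist_append_left _ _)
          · intro q hq hcontra
            by_cases hqx : q ≤ x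
            · rw [hdp q hqx, hpt2] at hcontra
              have h3 := (pvSnocNe (fun he => hc he.symm)).mp hcontra
              rw [← hpt2] at h3
              exact hmax q hq h3
            · rw [List.drop_eq_nil_of_le (by rw [List.length_take]; omega)] at hcontra
              exact pvTakeNE pat j hj (List.sublist_nil.mp hcontra)
        · rw [if_neg (fun h => hM (hE.mp h)), if_neg hcndn]
          rw [if_neg hM] at IH
          exact IH

lemma pvSortedSplit : ∀ (l : List Nat) (m : Nat), l.Pairwise (· < ·) →
    l = l.filter (fun i => decide (i ≤ m)) ++ l.filter (fun i => decide (m < i)) := by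
  intro l m
  induction l with
  | nil => intro _; rfl
  | cons a l ih =>
      intro hp
      rw [List.pairwise_cons] at hp
      obtain ⟨ha, hl⟩ := hp
      by_cases ham : a ≤ m
      · rw [List.filter_cons, List.filter_cons, if_pos (by simpa using ham),
          if_neg (by simp; omega), List.cons_append]
        exact congrArg (List.cons a) (ih hl)
      · have hgt : m < a := by omega
        have hall : ∀ b ∈ l, m < b := fun b hb => lt_trans hgt (ha b hb)
        rw [List.filter_cons, List.filter_cons, if_neg (by simp; omega),
          if_pos (by simpa using hgt)]
        have h0 : l.filter (fun i => decide (i ≤ m)) = [] := by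
          rw [List.filter_eq_nil_iff]
          intro b hb
          have := hall b hb
          simp
          omega
        have h1 : l.filter (fun i => decide (m < i)) = l := by
          rw [List.filter_eq_self]
          intro b hb
          simpa using hall b hb
        rw [h0, h1, List.nil_append]

lemma pvGoA_skip (t pat : List Char) :
    ∀ (l l' : List Int) (num : Nat), (∀ q ∈ l, ¬ (pvScanA t pat q).1 = pat.length) →
      pvGoA t pat num (l ++ l') = pvGoA t pat (num + l.length) l' := by
  intro l
  induction l with
  | nil => intro l' num _; simp
  | cons q l ih =>
      intro l' num h
      rw [List.cons_append]
      simp only [pvGoA]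
      rw [if_neg (h q (by simp)), ih l' (num + 1) (fun r hr => h r (by simp [hr]))]
      congr 1
      simp
      omega

lemma pvGoA_pos (t pat : List Char) :
    ∀ (l : List Int) (num : Nat), (∃ q ∈ l, (pvScanA t pat q).1 = pat.length) →
      0 ≤ pvGoA t pat num l := by
  intro l
  induction l with
  | nil =>
      rintro num ⟨q, hq, -⟩
      simp at hq
  | cons q l ih =>
      rintro num ⟨q', hq', hc⟩
      simp only [pvGoA]
      by_cases h : (pvScanA t pat q).1 = pat.length
      · rw [if_pos h]
        exact Int.natCast_nonneg num
      · rw [if_neg h]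
        apply ih
        rcases List.mem_cons.mp hq' with rfl | hmem
        · exact absurd hc h
        · exact ⟨q', hmem, hc⟩

lemma pvCondA_nat (t pat : List Char) (i : Nat) :
    ((pvScanA t pat ((i : Nat) : Int)).1 = pat.length) ↔ List.Sublist pat (t.drop i) := by
  rw [pvCondA_iff]
  unfold pvScannedP
  rw [if_pos (by exact_mod_cast Nat.zero_le i)]
  rw [Int.toNat_natCast]

-- A's first loop builds init ++ (first-char occurrence indices); A = pvGoA on the reversal
lemma pvA_eq (text str : String) (init : List Int) :
    return_MinMainString text str init
      = pvGoA text.toList str.toList 0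
          ((((List.range text.toList.length).filter
              (fun (i : Nat) => decide (PySem.List.pyGet? text.toList (i : Int)
                = PySem.List.pyGet? str.toList 0))).map
            (fun (i : Nat) => (i : Int))).reverse ++ init.reverse) := by
  simp only [return_MinMainString]
  set t := text.toList with ht
  set pat := str.toList with hpatdef
  have hfun2 : (fun (acc : List Int) (i : Int) =>
      if PySem.List.pyGet? t i = PySem.List.pyGet? pat 0 then acc ++ [i] else acc)
      = (fun acc i =>
        if (fun x => decide (PySem.List.pyGet? t x = PySem.List.pyGet? pat 0)) i = true
        then acc ++ [id i] else acc) := by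
    funext acc i
    by_cases hq : PySem.List.pyGet? t i = PySem.List.pyGet? pat 0
    · simp [hq]
    · simp [hq]
  rw [hfun2, PySem.List.foldl_append_if, List.map_id]
  have hrange : (PySem.List.pyRange 0 (t.length : Int)).filter
      (fun x => decide (PySem.List.pyGet? t x = PySem.List.pyGet? pat 0))
      = ((List.range t.length).filter
          (fun (i : Nat) => decide (PySem.List.pyGet? t (i : Int) = PySem.List.pyGet? pat 0))).map
          (fun (i : Nat) => (i : Int)) := by
    rw [PySem.List.pyRange_zero_nat, List.filter_map]
    rfl
  rw [hrange, List.reverse_append]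

theorem pvAux (text str : String) (init : List Int) (hpat : str.toList ≠ [])
    (hnd : ¬ List.Sublist str.toList text.toList →
      ∀ p ∈ init, p < 0 → ¬ List.Sublist str.toList (pvScannedP text.toList p)) :
    return_MinMainString text str init = return_MinMainString_alt text str init := by
  rw [pvA_eq]
  simp only [return_MinMainString_alt]
  set t := text.toList with ht
  set pat := str.toList with hpatdef
  rw [if_neg hpat]
  have hlen1 : 1 ≤ pat.length := List.length_pos_iff.mpr hpat
  set occ := (List.range t.length).filter
      (fun (i : Nat) => decide (PySem.List.pyGet? t (i : Int) = PySem.List.pyGet? pat 0)) with hoccdef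
  have hcastj : ((pat.length : Int) - 1) = Int.ofNat (pat.length - 1) := by
    rw [show Int.ofNat (pat.length - 1) = ((pat.length - 1 : Nat) : Int) from rfl]
    omega
  rw [hcastj]
  have hRL := pvRevLoopB_spec t pat t.length (pat.length - 1) (le_refl _) (by omega)
  rw [show pat.length - 1 + 1 = pat.length from by omega] at hRL
  simp only [List.take_length] at hRL
  have hoccP : occ.Pairwise (· < ·) :=
    List.Pairwise.sublist List.filter_sublist List.pairwise_lt_range
  by_cases hT : List.Sublist pat t
  · rw [if_pos hT] at hRL
    obtain ⟨p, hrec, hplen, hsub, hmax⟩ := hRL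
    rw [hrec]
    rw [if_pos (show ((-1 : Int), Int.ofNat p).1 < 0 from by norm_num)]
    have hS : ∀ i : Nat, List.Sublist pat (t.drop i) ↔ i ≤ p := by
      intro i
      constructor
      · intro h
        by_contra hcon
        exact hmax i (by omega) h
      · intro h
        have hdd : t.drop p = (t.drop i).drop (p - i) := by
          rw [List.drop_drop]
          congr 1
          omega
        rw [hdd] at hsub
        exact hsub.trans (List.drop_sublist _ _)
    obtain ⟨c, cs, hpc⟩ : ∃ c cs, pat = c :: cs := by
      cases hx : pat with
      | nil => exact absurd hx hpat
      | cons c cs => exact ⟨c, cs, rfl⟩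
    have hpOcc : p ∈ occ := by
      have hdropp : t.drop p = t[p] :: t.drop (p + 1) := List.drop_eq_getElem_cons hplen
      have htp : t[p] = c := by
        by_contra hne
        have h1 : List.Sublist pat (t.drop (p + 1)) := by
          have h2 := hsub
          rw [hdropp, hpc] at h2
          rw [hpc]
          exact (pvConsNe (fun he => hne he.symm)).mp h2
        have := (hS (p + 1)).mp h1
        omega
      rw [hoccdef, List.mem_filter, List.mem_range]
      refine ⟨hplen, ?_⟩
      rw [PySem.List.pyGet?_natCast, List.getElem?_eq_getElem hplen, htp, hpc,
        PySem.List.pyGet?_zero_cons]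
      simp
    have hsplit := pvSortedSplit occ p hoccP
    set u := occ.filter (fun i => decide (i ≤ p)) with hudef
    set v := occ.filter (fun i => decide (p < i)) with hvdef
    have hfiltB : occ.filter
        (fun (i : Nat) => decide (((-1 : Int), Int.ofNat p).2 < (i : Int))) = v := by
      rw [hvdef]
      apply List.filter_congr
      intro i _
      rw [decide_eq_decide]
      rw [show ((-1 : Int), Int.ofNat p).2 = ((p : Nat) : Int) from rfl]
      exact_mod_cast Iff.rfl
    rw [hfiltB]
    rw [hsplit, List.map_append, List.reverse_append, List.append_assoc]
    rw [pvGoA_skip t pat ((v.map (fun (i : Nat) => (i : Int))).reverse) _ 0 ?hskip]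
    case hskip =>
      intro q hq
      rw [List.mem_reverse, List.mem_map] at hq
      obtain ⟨i, hiv, rfl⟩ := hq
      have hip : p < i := of_decide_eq_true (List.mem_filter.mp hiv).2
      rw [pvCondA_nat, hS i]
      omega
    have hpu : p ∈ u := by
      rw [hudef, List.mem_filter]
      exact ⟨hpOcc, by simp⟩
    cases hur : (u.map (fun (i : Nat) => (i : Int))).reverse with
    | nil =>
        exfalso
        rw [List.reverse_eq_nil_iff, List.map_eq_nil_iff] at hur
        rw [hur] at hpu
        simp at hpu
    | cons q0 rest =>
        have hq0 : q0 ∈ u.map (fun (i : Nat) => (i : Int)) := by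
          rw [← List.mem_reverse, hur]
          simp
        obtain ⟨i0, hi0u, rfl⟩ := List.mem_map.mp hq0
        have hi0p : i0 ≤ p := of_decide_eq_true (List.mem_filter.mp hi0u).2
        have hcondi0 : (pvScanA t pat ((i0 : Nat) : Int)).1 = pat.length :=
          (pvCondA_nat t pat i0).mpr ((hS i0).mpr hi0p)
        rw [List.cons_append]
        simp only [pvGoA]
        rw [if_pos hcondi0]
        simp
  · rw [if_neg hT] at hRL
    rw [if_neg (not_lt.mpr hRL)]
    have hall : ∀ q ∈ (occ.map (fun (i : Nat) => (i : Int))).reverse ++ init.reverse,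
        ¬ (pvScanA t pat q).1 = pat.length := by
      intro q hq
      rcases List.mem_append.mp hq with hq1 | hq2
      · rw [List.mem_reverse, List.mem_map] at hq1
        obtain ⟨i, _, rfl⟩ := hq1
        rw [pvCondA_nat]
        intro hcon
        exact hT (hcon.trans (List.drop_sublist _ _))
      · rw [List.mem_reverse] at hq2
        rw [pvCondA_iff]
        by_cases hq0 : 0 ≤ q
        · unfold pvScannedP
          rw [if_pos hq0]
          intro hcon
          exact hT (hcon.trans (List.drop_sublist _ _))
        · exact hnd hT q hq2 (by omega)
    have hgo := pvGoA_skip t pat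
        ((occ.map (fun (i : Nat) => (i : Int))).reverse ++ init.reverse) [] 0 hall
    rw [List.append_nil] at hgo
    rw [hgo]
    rfl

-- ===== VERDICT =====
theorem return_MinMainString_spec : Claim_unchanged_return_MinMainString := by
  intro text str init _hdom hpre
  unfold Spec_return_MinMainString
  intro hnd
  cases hpre with
  | inl h =>
      refine pvAux text str init h.1 ?_
      intro hT p hp hpneg hfit
      exact hnd ⟨h.1, hT, p, hp, hpneg, hfit⟩
  | inr h =>
      obtain ⟨hpat, htxt, hhead⟩ := h
      rw [pvA_eq]
      simp only [return_MinMainString_alt]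
      rw [htxt, hpat]
      cases hr : init.reverse with
      | nil => rw [hr] at hhead; simp at hhead
      | cons p rest =>
          rw [if_pos rfl]
          simp only [List.length_nil, List.range_zero, List.filter_nil, List.map_nil,
            List.reverse_nil, List.nil_append]
          rw [hr] at hhead
          simp only [Option.elim, List.head?] at hhead
          have hscan : pvScanA [] [] p = (0, 0) := by
            have hp0 : (0 : Int) ≤ p := of_decide_eq_true hhead
            unfold pvScanA
            rw [show (([] : List Char).length : Int) = 0 from rfl,
              PySem.List.pyRange_one_eq_nil hp0]
            rfl
          simp only [pvGoA]
          rw [if_pos (show (pvScanA [] [] p).1 = ([] : List Char).length by rw [hscan]; rfl)]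
          rfl

theorem return_MinMainString_changed : Claim_changed_return_MinMainString := by
  unfold Claim_changed_return_MinMainString; decide

theorem return_MinMainString_tight : Claim_exact_return_MinMainString := by
  intro text str init _hdom _hpre hD
  obtain ⟨hpat, hT, p, hmem, hpneg, hfit⟩ := hD
  have hlen1 : 1 ≤ str.toList.length := List.length_pos_iff.mpr hpat
  have hRL := pvRevLoopB_spec text.toList str.toList text.toList.length
      (str.toList.length - 1) (le_refl _) (by omega)
  rw [show str.toList.length - 1 + 1 = str.toList.length from by omega] at hRL
  simp only [List.take_length] at hRL
  rw [if_neg hT] at hRL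
  have hcastj : ((str.toList.length : Int) - 1) = Int.ofNat (str.toList.length - 1) := by
    rw [show Int.ofNat (str.toList.length - 1) = ((str.toList.length - 1 : Nat) : Int) from rfl]
    omega
  have hB : return_MinMainString_alt text str init = -1 := by
    simp only [return_MinMainString_alt]
    rw [if_neg hpat, hcastj, if_neg (not_lt.mpr hRL)]
  have hA : 0 ≤ return_MinMainString text str init := by
    rw [pvA_eq]
    apply pvGoA_pos
    exact ⟨p, List.mem_append.mpr (Or.inr (List.mem_reverse.mpr hmem)),
      (pvCondA_iff _ _ _).mpr hfit⟩
  intro heq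
  rw [heq, hB] at hA
  exact absurd hA (by decide)
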